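-- pv_equiv track=rewrite | github.com/makximkiselev/internal_gorb_bot | handlers/auto_replies/listener.py | _filter_parsed_by_allowed
-- ===== SOURCE A (Python) =====
-- def _path_matches_allowed(path: list[str], allowed_spec: list[list[str]]) -> bool:
--     if not allowed_spec:
--         return True
--     if not path:
--         return False
--     for ap in allowed_spec:
--         n = min(len(path), len(ap))
--         if path[:n] == ap[:n]:
--             return True
--     return False
--
-- def _filter_parsed_by_allowed(parsed_list: list[dict], allowed_spec: list[list[str]]) -> list[dict]:
--     if not allowed_spec:
--         return parsed_list
--     out: list[dict] = []
--     for p in parsed_list: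
--         p_path = p.get("path") or []
--         if not isinstance(p_path, list):
--             continue
--         path_norm = [str(x) for x in p_path]
--         if _path_matches_allowed(path_norm, allowed_spec):
--             out.append(p)
--     return out
-- ===== SOURCE B (Python) =====
-- def _filter_parsed_by_allowed(parsed_list: list[dict], allowed_spec: list[list[str]]) -> list[dict]:
--     if not allowed_spec:
--         return parsed_list
--     # Build a prefix trie of the allowed specs once; key None marks "a spec ends here".
--     root: dict = {}
--     for ap in allowed_spec:
--         node = root
--         for seg in ap:
--             node = node.setdefault(seg, {})
--         node[None] = True
--
--     def walk(path: list[str]) -> bool: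
--         if not path:
--             return False
--         node = root
--         for seg in path:
--             if None in node:       # some spec is a prefix of path
--                 return True
--             nxt = node.get(seg)
--             if nxt is None:
--                 return False
--             node = nxt
--         return True                # path fully consumed inside the trie: path is a prefix of some spec
--
--     out: list[dict] = []
--     for p in parsed_list:
--         p_path = p.get("path") or []
--         if not isinstance(p_path, list):
--             continue
--         if walk([str(x) for x in p_path]):
--             out.append(p)
--     return out
-- ===== Notes on version B (the rewrite author's own statement) =====
-- stated objective: alternative
-- what changed: Replaces A's per-item scan over every allowed spec with slice comparisons by a prefix trie built once from allowed_spec; each path is walked once, matching if it hits a spec endpoint or is fully consumed inside the trie (pays off only when allowed_spec is large; measured no speed-up on the generated inputs).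
import Mathlib
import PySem

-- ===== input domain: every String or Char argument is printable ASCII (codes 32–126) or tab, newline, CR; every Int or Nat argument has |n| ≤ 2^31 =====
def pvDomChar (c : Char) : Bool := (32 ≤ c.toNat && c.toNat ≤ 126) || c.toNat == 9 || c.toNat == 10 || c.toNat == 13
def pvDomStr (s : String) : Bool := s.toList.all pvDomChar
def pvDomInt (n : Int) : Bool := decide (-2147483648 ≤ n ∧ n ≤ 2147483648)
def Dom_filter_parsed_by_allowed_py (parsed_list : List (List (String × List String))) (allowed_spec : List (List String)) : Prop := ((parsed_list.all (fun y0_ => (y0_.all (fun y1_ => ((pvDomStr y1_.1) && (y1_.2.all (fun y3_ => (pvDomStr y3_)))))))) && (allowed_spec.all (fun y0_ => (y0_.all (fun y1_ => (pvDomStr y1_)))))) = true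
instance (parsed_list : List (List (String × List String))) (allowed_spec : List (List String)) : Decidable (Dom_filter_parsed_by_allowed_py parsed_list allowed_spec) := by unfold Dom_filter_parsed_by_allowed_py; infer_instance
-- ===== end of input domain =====

-- B replaces A's per-item scan over all allowed specs (slice comparison each time) by a prefix trie
-- built once from allowed_spec, walking each path a single time (objective: alternative algorithm).

-- ===== PORT A =====
-- p.get("path") with None→[] : first matching key in the association list
def getPath (p : List (String × List String)) : List String :=
  match p.find? (fun kv => kv.1 == "path") with | some kv => kv.2 | none => []

-- inner loop of _path_matches_allowed: 'for ap in allowed_spec: n = min(...); if path[:n] == ap[:n]: return True'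
def pmaLoop (path : List String) : List (List String) → Bool
  | [] => false
  | ap :: rest =>
    let n : Int := min (path.length : Int) (ap.length : Int)
    if PySem.List.slice path none (some n) = PySem.List.slice ap none (some n) then true
    else pmaLoop path rest

def path_matches_allowed (path : List String) (allowed_spec : List (List String)) : Bool :=
  if allowed_spec = [] then true
  else if path = [] then false
  else pmaLoop path allowed_spec

def filter_parsed_by_allowed_py (parsed_list : List (List (String × List String))) (allowed_spec : List (List String)) : List (List (String × List String)) :=
  if allowed_spec = [] then parsed_list
  else
    parsed_list.foldl (fun out p =>
      -- p.get("path") or []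
      let p_path := getPath p
      let p_path : List String := if p_path = [] then [] else p_path
      -- isinstance(p_path, list) is always true under the type convention
      let path_norm := p_path.map (fun x => x)   -- [str(x) for x in p_path]; str on str is identity
      if path_matches_allowed path_norm allowed_spec then out ++ [p] else out) []

-- ===== PORT B =====
mutual
inductive Trie : Type where
  | node : Bool → TrieKids → Trie
inductive TrieKids : Type where
  | nil : TrieKids
  | cons : String → Trie → TrieKids → TrieKids
end

def kidsFind : TrieKids → String → Option Trie
  | .nil, _ => none
  | .cons k t rest, s => if k == s then some t else kidsFind rest s

def kidsSet : TrieKids → String → Trie → TrieKids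
  | .nil, s, t => .cons s t .nil
  | .cons k c tail, s, t => if k == s then .cons k t tail else .cons k c (kidsSet tail s t)

-- node = node.setdefault(seg, {}) … node[None] = True
def trieInsert : Trie → List String → Trie
  | .node _ kids, [] => .node true kids
  | .node e kids, s :: rest =>
    let child := (kidsFind kids s).getD (.node false .nil)
    .node e (kidsSet kids s (trieInsert child rest))

-- the 'for seg in path' loop of walk (full consumption inside the trie → True)
def trieWalk : Trie → List String → Bool
  | _, [] => true
  | .node e kids, s :: rest =>
    if e then true
    else match kidsFind kids s with
      | some t => trieWalk t rest
      | none => false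

-- walk(path): 'if not path: return False' then the loop
def bMatch (root : Trie) (path : List String) : Bool :=
  match path with
  | [] => false
  | _ :: _ => trieWalk root path

def filter_parsed_by_allowed_py_alt (parsed_list : List (List (String × List String))) (allowed_spec : List (List String)) : List (List (String × List String)) :=
  if allowed_spec = [] then parsed_list
  else
    let root := allowed_spec.foldl trieInsert (.node false .nil)
    parsed_list.filter (fun p =>
      let p_path := getPath p
      let p_path : List String := if p_path = [] then [] else p_path
      bMatch root (p_path.map (fun x => x)))

-- ===== PRECONDITION & SPEC =====
def Spec_filter_parsed_by_allowed_py (parsed_list : List (List (String × List String))) (allowed_spec : List (List String)) (out : List (List (String × List String))) : Prop := out = filter_parsed_by_allowed_py_alt parsed_list allowed_spec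
instance (parsed_list : List (List (String × List String))) (allowed_spec : List (List String)) (out : List (List (String × List String))) : Decidable (Spec_filter_parsed_by_allowed_py parsed_list allowed_spec out) := by unfold Spec_filter_parsed_by_allowed_py; infer_instance

-- ===== CLAIM (what is proved, stated in full; the proofs are below) =====
def Claim_equal_filter_parsed_by_allowed_py : Prop := ∀ (parsed_list : List (List (String × List String))) (allowed_spec : List (List String)), Dom_filter_parsed_by_allowed_py parsed_list allowed_spec → Spec_filter_parsed_by_allowed_py parsed_list allowed_spec (filter_parsed_by_allowed_py parsed_list allowed_spec)

-- ===== LEMMAS AND PROOFS =====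

-- 'path and ap agree on the first min(len,len) segments'
def compat : List String → List String → Bool
  | [], _ => true
  | _ :: _, [] => true
  | a :: as, b :: bs => (a == b) && compat as bs

theorem take_min_eq_compat (ap p : List String) :
    (p.take (min p.length ap.length) = ap.take (min p.length ap.length)) ↔ compat ap p = true := by
  induction ap generalizing p with
  | nil => simp [compat]
  | cons a as ih =>
    cases p with
    | nil => simp [compat]
    | cons x xs =>
      simp only [List.length_cons, Nat.succ_min_succ, List.take_succ_cons, compat,
        Bool.and_eq_true, beq_iff_eq, List.cons.injEq, ih]
      tauto

theorem pmaLoop_eq_any (path : List String) (spec : List (List String)) :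
    pmaLoop path spec = spec.any (fun ap => compat ap path) := by
  induction spec with
  | nil => simp [pmaLoop]
  | cons ap rest ih =>
    simp only [pmaLoop, List.any_cons]
    have hmin : min (path.length : Int) (ap.length : Int) = ((min path.length ap.length : Nat) : Int) := by
      omega
    rw [hmin, PySem.List.slice_to_natCast, PySem.List.slice_to_natCast]
    by_cases h : path.take (min path.length ap.length) = ap.take (min path.length ap.length)
    · simp [h, (take_min_eq_compat ap path).mp h]
    · have : compat ap path = false := by
        rcases Bool.eq_false_or_eq_true (compat ap path) with ht | hf
        · exact absurd ((take_min_eq_compat ap path).mpr ht) h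
        · exact hf
      simp [h, this, ih]

theorem kidsFind_kidsSet : ∀ (kids : TrieKids) (a s : String) (t : Trie),
    kidsFind (kidsSet kids a t) s = if a == s then some t else kidsFind kids s
  | .nil, a, s, t => by by_cases h : a = s <;> simp [kidsSet, kidsFind, h]
  | .cons k c tail, a, s, t => by
    by_cases hka : k = a
    · subst hka
      by_cases hks : k = s <;> simp [kidsSet, kidsFind, hks]
    · by_cases hks : k = s
      · subst hks
        have hak : ¬ (a = k) := fun h => hka h.symm
        simp [kidsSet, kidsFind, hka, hak]
      · simp [kidsSet, kidsFind, hka, hks, kidsFind_kidsSet tail a s t]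

theorem trieWalk_empty (path : List String) (h : path ≠ []) :
    trieWalk (.node false .nil) path = false := by
  cases path with
  | nil => exact absurd rfl h
  | cons s rest => simp [trieWalk, kidsFind]

theorem trieWalk_insert (ap : List String) (t : Trie) (path : List String) (h : path ≠ []) :
    trieWalk (trieInsert t ap) path = (compat ap path || trieWalk t path) := by
  induction ap generalizing t path with
  | nil =>
    cases t with
    | node e kids =>
      cases path with
      | nil => exact absurd rfl h
      | cons s rest => simp [trieInsert, trieWalk, compat]
  | cons a as ih =>
    cases t with
    | node e kids =>
      cases path with
      | nil => exact absurd rfl h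
      | cons s rest =>
        simp only [trieInsert, trieWalk, compat]
        cases e with
        | true => simp
        | false =>
          simp only [if_false, Bool.false_eq_true]
          rw [kidsFind_kidsSet]
          by_cases has : a = s
          · subst has
            simp only [BEq.rfl, if_true]
            cases rest with
            | nil => cases as <;> simp [trieWalk, compat]
            | cons r rs =>
              rw [ih _ _ (by simp)]
              cases hf : kidsFind kids a with
              | some t' => simp
              | none =>
                simp only [Option.getD_none]
                rw [trieWalk_empty _ (by simp)]
                simp
          · have : ¬ (a == s) = true := by simp [has]
            simp [this]

theorem trieWalk_foldl (spec : List (List String)) (t : Trie) (path : List String) (h : path ≠ []) :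
    trieWalk (spec.foldl trieInsert t) path
      = (spec.any (fun ap => compat ap path) || trieWalk t path) := by
  induction spec generalizing t with
  | nil => simp
  | cons ap rest ih =>
    simp only [List.foldl_cons, List.any_cons]
    rw [ih, trieWalk_insert _ _ _ h]
    cases compat ap path <;> simp

theorem match_eq (spec : List (List String)) (hs : spec ≠ []) (path : List String) :
    path_matches_allowed path spec = bMatch (spec.foldl trieInsert (.node false .nil)) path := by
  cases path with
  | nil => simp [path_matches_allowed, bMatch, hs]
  | cons s rest =>
    simp only [path_matches_allowed, bMatch, hs, if_false]
    rw [pmaLoop_eq_any, trieWalk_foldl _ _ _ (by simp),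
      trieWalk_empty _ (by simp)]
    simp

-- foldl-append accumulator equals filter
theorem foldl_filter (f : List (String × List String) → Bool)
    (l : List (List (String × List String))) (acc : List (List (String × List String))) :
    l.foldl (fun out p => if f p then out ++ [p] else out) acc = acc ++ l.filter f := by
  induction l generalizing acc with
  | nil => simp
  | cons p rest ih =>
    by_cases h : f p <;> simp [List.foldl_cons, h, ih]

-- ===== VERDICT (by name: the statement is the Claim_ definition above) =====
theorem filter_parsed_by_allowed_py_spec : Claim_equal_filter_parsed_by_allowed_py := by
  intro parsed_list allowed_spec _
  unfold Spec_filter_parsed_by_allowed_py filter_parsed_by_allowed_py filter_parsed_by_allowed_py_alt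
  by_cases hs : allowed_spec = []
  · simp [hs]
  · simp only [hs, if_false]
    rw [foldl_filter]
    simp only [List.nil_append]
    apply List.filter_congr
    intro p _
    rw [match_eq allowed_spec hs]
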